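/- GENERATED by mk_final_copies.py from the proof of the farm's unit `vorbis_deinit.3` (farm:vorbis_deinit.3.1: Lemmas.lean) as the
   re-elaboration sweep compiled it — do not edit. -/
import Asan.CheckWalk
import Vorbis.Spec.Units.vorbis_deinit_3

open X86 X86.User Asan Vorbis Vorbis.Spec

set_option maxRecDepth 4000
set_option maxHeartbeats 4000000

namespace Vorbis.Spec.vorbis_deinit_3

/-- `movsxd` of a small loop counter held zero-extended in a register is the counter. -/
theorem sext_small (i : Nat) (h : i < 2 ^ 31) :
    Word.ofBV (BitVec.signExtend 64 (Word.part .w32 (UInt64.ofNat i))) = UInt64.ofNat i := by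
  apply UInt64.toNat_inj.mp
  have e1 : (Word.part .w32 (UInt64.ofNat i)).toNat = i := by
    rw [Vorbis.toNat_part32, UInt64.toNat_ofNat']
    omega
  rw [Vorbis.Spec.toNat_sext32 _ (by omega), e1, UInt64.toNat_ofNat']
  omega

/-- A small loop counter read as a signed 32-bit number (the walker's form of `cmp r12d, …`) is the counter. -/
theorem counter_toInt (i : Nat) (h : i < 2 ^ 31) : (Word.part .w32 (UInt64.ofNat i)).toInt = (i : Int) := by
  have e1 : (Word.part .w32 (UInt64.ofNat i)).toNat = i := by
    rw [Vorbis.toNat_part32, UInt64.toNat_ofNat']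
    omega
  rw [Vorbis.Spec.toInt_of_lt _ (by omega), e1]

/-- `add r12d, 1` on a small loop counter held zero-extended in a register: the next counter. -/
theorem add1_small (i : Nat) (h : i < 2 ^ 31) :
    Word.ofBV (Word.part .w32 (UInt64.ofNat i) + 1#32) = UInt64.ofNat (i + 1) := by
  apply UInt64.toNat_inj.mp
  have e1 : (Word.part .w32 (UInt64.ofNat i)).toNat = i := by
    rw [Vorbis.toNat_part32, UInt64.toNat_ofNat']
    omega
  have e2 : (1#32).toNat = 1 := by decide
  rw [Vorbis.toNat_ofBV32, BitVec.toNat_add, e1, e2, UInt64.toNat_ofNat']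
  omega

/-- No store below the entry stack pointer reaches the shadow region. -/
theorem untouched_of_same {m m' : Mem} {sp : Nat} (h : Mem.SameExcept [⟨sp - 96, sp⟩] m m') (htop : sp + 8 ≤ 0x800000) :
    ShadowUntouched m m' := by
  unfold ShadowUntouched
  apply h.eqOn
  intro w hw
  have e1 : w = ⟨sp - 96, sp⟩ := List.mem_singleton.mp hw
  subst e1
  simp only
  omega

/-- A check site inside `*p`, in a memory that differs from the entry memory below the entry stack pointer only. -/
theorem check_obj {others : List Obj} {frames : List (Nat × FrameLayout)} {f top sp : Nat} {m m' : Mem}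
    (hobj : ObjLive others frames f) (hinv : ShadowInv others frames top m)
    (h : Mem.SameExcept [⟨sp - 96, sp⟩] m m') (htop : sp + 8 ≤ 0x800000) (b : Word) (k : Nat) (hk : 1 ≤ k)
    (h1 : f ≤ b.toNat) (h2 : b.toNat + k ≤ f + 1808) : AccSmall k m' b :=
  hobj.accSmall hinv (untouched_of_same h htop) b k hk h1 h2

/-- **What segment 3 keeps of the memory** (the memory part of `vorbis_deinit.At`, bundled so that a walk's context holds ONE
hypothesis about the memory instead of six): nothing was stored but below the entry stack pointer (H6), and the five saved
registers are in their slots. `e` is the state at the function's entry, `m` the present memory. -/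
structure Seg3Mem (e : State) (m : Mem) : Prop where
  /-- H6: nothing was stored but below the entry rsp -/
  same : Mem.SameExcept [⟨(e.reg .rsp).toNat - 96, (e.reg .rsp).toNat⟩] e.mem m
  /-- the saved registers, in push order -/
  slot_r14 : m.readLE (e.reg .rsp - 8) 8 = (e.reg .r14).toNat
  slot_r13 : m.readLE (e.reg .rsp - 16) 8 = (e.reg .r13).toNat
  slot_r12 : m.readLE (e.reg .rsp - 24) 8 = (e.reg .r12).toNat
  slot_rbp : m.readLE (e.reg .rsp - 32) 8 = (e.reg .rbp).toNat
  slot_rbx : m.readLE (e.reg .rsp - 40) 8 = (e.reg .rbx).toNat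

namespace Seg3Mem
variable {e : State} {m m' : Mem}

/-- The memory part of the assertion at a cut point. -/
theorem of_at {cut : Word} {others : List Obj} {frames : List (Nat × FrameLayout)} {Blk : Block → Prop} {u₀ v : State}
    {ret : Word} (h : vorbis_deinit.At cut others frames Blk u₀ e ret v) : Seg3Mem e v.mem :=
  ⟨h.same, h.slot_r14, h.slot_r13, h.slot_r12, h.slot_rbp, h.slot_rbx⟩

/-- **A return address pushed** (every `call` of the segment stores it at `entry rsp − 48`, below the five slots). -/
theorem push (h : Seg3Mem e m) (hroom : 7340032 + 96 ≤ (e.reg .rsp).toNat) (htop : (e.reg .rsp).toNat + 8 ≤ 8388608)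
    (x : Nat) : Seg3Mem e (m.writeLE (e.reg .rsp - 48) 8 x) := by
  obtain ⟨hsame, h1, h2, h3, h4, h5⟩ := h
  refine ⟨?_, ?_, ?_, ?_, ?_, ?_⟩
  · u_same
  · u_frame h1
  · u_frame h2
  · u_frame h3
  · u_frame h4
  · u_frame h5

/-- **Through a call of `setup_free`** (frame 48, entered with `rsp = entry rsp − 48`; `hcal` is the walker's `w_same` after
`v_after_call`): the callee wrote below the return address it was called with only. -/
theorem callee (h : Seg3Mem e m) (hroom : 7340032 + 96 ≤ (e.reg .rsp).toNat) (htop : (e.reg .rsp).toNat + 8 ≤ 8388608)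
    {x : Nat}
    (hcal : Mem.SameExcept [⟨(e.reg .rsp - 48).toNat - 48, (e.reg .rsp - 48).toNat⟩] (m.writeLE (e.reg .rsp - 48) 8 x) m') :
    Seg3Mem e m' := by
  obtain ⟨hsame, h1, h2, h3, h4, h5⟩ := h
  refine ⟨?_, ?_, ?_, ?_, ?_, ?_⟩
  · u_same
  · u_frame h1
  · u_frame h2
  · u_frame h3
  · u_frame h4
  · u_frame h5

/-- No shadow byte was written since the entry. -/
theorem untouched (h : Seg3Mem e m) (htop : (e.reg .rsp).toNat + 8 ≤ 8388608) : ShadowUntouched e.mem m :=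
  untouched_of_same h.same htop

/-- **A check site inside `*p`** (`p` = the entry `rdi`): the `k` bytes at `b` lie inside the 1808 bytes of the object. -/
theorem check {others : List Obj} {frames : List (Nat × FrameLayout)} {top : Nat} (h : Seg3Mem e m)
    (htop : (e.reg .rsp).toNat + 8 ≤ 8388608) (hobj : ObjLive others frames (e.reg .rdi).toNat)
    (hinv : ShadowInv others frames top e.mem) (b : Word) (k : Nat) (hk : 1 ≤ k)
    (h1 : (e.reg .rdi).toNat ≤ b.toNat) (h2 : b.toNat + k ≤ (e.reg .rdi).toNat + 1808) : AccSmall k m b :=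
  hobj.accSmall hinv (h.untouched htop) b k hk h1 h2

end Seg3Mem

/-- **The assertion at another cut point**, from what the assertion the segment was entered with says of the function's entry
(`entry`, `pre`) and the walker's facts about the present state `x`. -/
theorem at_of_kept {cut : Word} {others : List Obj} {frames : List (Nat × FrameLayout)} {Blk : Block → Prop}
    {u₀ e x : State} {ret : Word}
    (hentry : AtEntry (conv u₀) L.vorbis_deinit.entry (vorbis_deinit.spec others frames Blk).frame ret e)
    (hpre : (vorbis_deinit.spec others frames Blk).pre e) (hrip : x.rip = cut)
    (hrsp : x.reg .rsp = e.reg .rsp - 40) (hrbx : x.reg .rbx = e.reg .rdi) (hr15 : x.reg .r15 = e.reg .r15)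
    (hk : Seg3Mem e x.mem) (hcode : (conv u₀).code.In x.mem) (hinv : (conv u₀).inv x) :
    vorbis_deinit.At cut others frames Blk u₀ e ret x :=
  ⟨hentry, hpre, hrip, hrsp, hrbx, hr15, hk.slot_r14, hk.slot_r13, hk.slot_r12, hk.slot_rbp, hk.slot_rbx, hk.same,
    hcode, hinv⟩

/-- **The precondition of `setup_free(p, q)` at each of the segment's eight call sites**: the state `s` stands at the callee's
entry, the return address just pushed at `entry rsp − 48`, `rdi = p`; the shadow clause is the function's own (no store went to
the shadow), `*p` is live (OB1). `rsi` is any value. -/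
theorem Seg3Mem.pre_setup_free {others : List Obj} {frames : List (Nat × FrameLayout)} {e s : State} {m : Mem} {x : Nat}
    (hk : Seg3Mem e m) (hsh : ShadowPre others frames e) (hobj : ObjLive others frames (e.reg .rdi).toNat)
    (hroom : 7340032 + 96 ≤ (e.reg .rsp).toNat) (htop : (e.reg .rsp).toNat + 8 ≤ 8388608)
    (halign : (e.reg .rsp).toNat % 8 = 0) (hmem : s.mem = m.writeLE (e.reg .rsp - 48) 8 x)
    (hrsp : s.reg .rsp = e.reg .rsp - 48) (hrdi : s.reg .rdi = e.reg .rdi) :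
    (setup_free.spec others frames).pre s := by
  refine ⟨hsh.callee ?_ ?_ ?_ ?_, ?_⟩
  · rw [hmem]
    exact (hk.push hroom htop _).untouched htop
  · rw [hrsp]
    u_omega
  · rw [hrsp]
    u_omega
  · rw [hrsp]
    u_omega
  · rw [hrdi]
    exact hobj

end Vorbis.Spec.vorbis_deinit_3
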